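-- pv_equiv track=rewrite | github.com/TakLee96/have_fun_with_python | modular.py | find_modular_coordinate
-- ===== SOURCE A (Python) =====
-- def find_modular_coordinate(x, y, value):
--     """Find such pair of numbers (a, b) such that
--        value = a * x + b * y
--
--     >>> find_modular_coordinate(5, 3, 2)
--     [1, -1]
--
--     >>> find_modular_coordinate(19, 12, 2)
--     [2, -3]
--     """
--     assert gcd(x, y) == 1, "Error: the greatest common divisor must be 1"
--     b = 1
--     multiple_of_y = y
--
--     while (multiple_of_y - value) % x != 0:
--         multiple_of_y += y
--         b += 1
--
--     a = value // x - multiple_of_y // x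
--
--     new_a = a + y
--     new_b = b - x
--
--     if abs(new_a - new_b) < abs(a - b):
--         return [new_a, new_b]
--     else:
--         return [a, b]
--
-- def gcd(x, y):
--     """Find the greatest common divisor of x and y
--
--     >>> gcd(12, 19)
--     1
--
--     >>> gcd(12, 15)
--     3
--
--     >>> gcd(18, 12)
--     6
--     """
--     #assert x >= 0 and y >= 0 and type(x) == int and type(y) == int, "Error: invalid input"
--
--     if y > x:
--         return gcd(y, x)
--     elif y == 0:
--         return x
--     else:
--         return gcd(y, x % y)
-- ===== SOURCE B (Python) =====
-- def find_modular_coordinate(x, y, value):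
--     """Find (a, b) with value = a * x + b * y, via extended Euclid (O(log x)
--     instead of A's O(x) linear search for b)."""
--     # extended Euclid: invariant r_i == t_i * y (mod x); ends with r0 == gcd(x, y)
--     r0, r1 = x, y % x
--     t0, t1 = 0, 1
--     while r1 != 0:
--         q = r0 // r1
--         r0, r1 = r1, r0 - q * r1
--         t0, t1 = t1, t0 - q * t1
--     assert r0 == 1, "Error: the greatest common divisor must be 1"
--     # t0 is y^{-1} mod x
--     b = (value * t0) % x or x      # smallest b >= 1 with b*y == value (mod x)
--     a = (value - b * y) // x       # exact division
--     new_a, new_b = a + y, b - x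
--     if abs(new_a - new_b) < abs(a - b):
--         return [new_a, new_b]
--     return [a, b]
-- ===== Notes on version B (the rewrite author's own statement) =====
-- stated objective: faster
-- what changed: Replaces A's linear search over multiples of y (incrementing b until (b*y - value) % x == 0) with an iterative extended-Euclidean computation of y^{-1} mod x, from which the smallest valid b in [1, x] is obtained directly.
import Mathlib
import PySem

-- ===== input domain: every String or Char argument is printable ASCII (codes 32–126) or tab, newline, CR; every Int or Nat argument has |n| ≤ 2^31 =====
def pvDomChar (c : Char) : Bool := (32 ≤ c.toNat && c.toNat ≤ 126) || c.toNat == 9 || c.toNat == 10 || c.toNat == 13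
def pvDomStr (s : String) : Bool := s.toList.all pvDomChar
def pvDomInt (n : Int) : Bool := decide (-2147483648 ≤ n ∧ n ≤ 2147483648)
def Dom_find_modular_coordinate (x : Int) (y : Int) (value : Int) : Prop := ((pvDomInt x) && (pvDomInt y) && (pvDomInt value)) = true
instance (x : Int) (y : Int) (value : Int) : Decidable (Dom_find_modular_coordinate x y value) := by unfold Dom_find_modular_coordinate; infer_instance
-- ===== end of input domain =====

-- B replaces A's O(x) linear search for b with an extended-Euclidean modular inverse (O(log x)).
-- Equivalence is claimed on Pre_ (x ≥ 1, y ≥ 0, gcd = 1), exactly where the Python A returns.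

-- ===== PORT A =====
-- A's recursive gcd; fuel makes the recursion total (Python recurses forever /
-- overflows the stack outside Pre_; fuel exhaustion returns 0 there, outside the claim).
def pyGcdA (fuel : Nat) (x y : Int) : Int :=
  match fuel with
  | 0 => 0
  | fuel + 1 =>
    if y > x then pyGcdA fuel y x
    else if y = 0 then x
    else pyGcdA fuel y (PySem.Int.mod x y)

-- A's while loop: advance (b, multiple_of_y) until (multiple_of_y - value) % x == 0.
-- Fuel x.toNat is enough under Pre_ (a valid b exists in [1, x]); exhaustion is unreachable there.
def findLoopA (x y value : Int) : Nat → Int → Int → Int × Int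
  | 0, b, m => (b, m)
  | fuel + 1, b, m =>
    if PySem.Int.mod (m - value) x ≠ 0 then findLoopA x y value fuel (b + 1) (m + y)
    else (b, m)

def find_modular_coordinate (x : Int) (y : Int) (value : Int) : List Int :=
  if pyGcdA (x.natAbs + y.natAbs + 2) x y ≠ 1 then []  -- assert gcd(x,y)==1 (AssertionError → outside Pre_)
  else
    let r := findLoopA x y value x.toNat 1 y
    let b := r.1
    let multiple_of_y := r.2
    let a := PySem.Int.floordiv value x - PySem.Int.floordiv multiple_of_y x
    let new_a := a + y
    let new_b := b - x
    if |new_a - new_b| < |a - b| then [new_a, new_b] else [a, b]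

-- ===== PORT B =====
-- Source B's extended-Euclid loop on state (r0, r1, t0, t1); returns (r0, t0) at r1 = 0.
def egcdB (r0 r1 t0 t1 : Int) : Int × Int :=
  if h : r1 = 0 then (r0, t0)
  else
    egcdB r1 (r0 - PySem.Int.floordiv r0 r1 * r1) t1 (t0 - PySem.Int.floordiv r0 r1 * t1)
termination_by r1.natAbs
decreasing_by
  have h1 : r0 - PySem.Int.floordiv r0 r1 * r1 = PySem.Int.mod r0 r1 := by
    have := PySem.Int.floordiv_mul_add_mod r0 r1; omega
  rw [h1]
  rcases lt_or_gt_of_ne h with hneg | hpos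
  · have := PySem.Int.mod_neg_bounds r0 hneg; omega
  · have h2 := PySem.Int.mod_nonneg r0 hpos
    have h3 := PySem.Int.mod_lt r0 hpos
    omega

def find_modular_coordinate_alt (x : Int) (y : Int) (value : Int) : List Int :=
  let g := egcdB x (PySem.Int.mod y x) 0 1
  if g.1 ≠ 1 then []  -- assert r0 == 1 (AssertionError → outside Pre_)
  else
  let t0 := g.2
  let c := PySem.Int.mod (value * t0) x
  let b := if c = 0 then x else c
  let a := PySem.Int.floordiv (value - b * y) x
  let new_a := a + y
  let new_b := b - x
  if |new_a - new_b| < |a - b| then [new_a, new_b] else [a, b]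

-- ===== PRECONDITION & SPEC =====
-- Pre_: exactly the inputs on which the Python A returns; outside it A raises
-- AssertionError (gcd ≠ 1), RecursionError (negative arguments in gcd) or
-- ZeroDivisionError (x = 0), or loops forever.
def Pre_find_modular_coordinate (x : Int) (y : Int) (value : Int) : Prop :=
  1 ≤ x ∧ 0 ≤ y ∧ Int.gcd x y = 1
instance (x : Int) (y : Int) (value : Int) : Decidable (Pre_find_modular_coordinate x y value) := by unfold Pre_find_modular_coordinate; infer_instance
def pvWitness_find_modular_coordinate : Int × Int × Int := (5, 3, 2)

def Spec_find_modular_coordinate (x : Int) (y : Int) (value : Int) (out : List Int) : Prop := out = find_modular_coordinate_alt x y value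
instance (x : Int) (y : Int) (value : Int) (out : List Int) : Decidable (Spec_find_modular_coordinate x y value out) := by unfold Spec_find_modular_coordinate; infer_instance

-- ===== CLAIM (what is proved, stated in full; the proofs are below) =====
def Claim_equal_find_modular_coordinate : Prop := ∀ (x : Int) (y : Int) (value : Int), Dom_find_modular_coordinate x y value → Pre_find_modular_coordinate x y value → Spec_find_modular_coordinate x y value (find_modular_coordinate x y value)

-- ===== LEMMAS AND PROOFS =====

-- A's gcd computes Int.gcd, with fuel exceeding the stated measure.
theorem pyGcdA_eq (fuel : Nat) : ∀ x y : Int, 0 ≤ x → 0 ≤ y → 0 < x + y →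
    (x + y).toNat + (if y > x then 1 else 0) < fuel →
    pyGcdA fuel x y = Int.gcd x y := by
  induction fuel with
  | zero => intro x y _ _ _ hf; omega
  | succ fuel ih =>
    intro x y hx hy hxy hf
    rw [pyGcdA]
    by_cases hswap : y > x
    · rw [if_pos hswap] at hf
      rw [if_pos hswap,
        ih y x hy hx (by omega) (by rw [if_neg (by omega : ¬ x > y)]; omega),
        Int.gcd_comm y x]
    · rw [if_neg hswap] at hf
      rw [if_neg hswap]
      by_cases hz : y = 0
      · rw [if_pos hz]
        subst hz
        rw [Int.gcd_zero_right]
        omega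
      · rw [if_neg hz]
        have hy1 : 1 ≤ y := by omega
        have hmodeq : PySem.Int.mod x y = x % y :=
          PySem.Int.mod_eq_emod_of_pos (by omega : (0:Int) < y)
        have hm0 : 0 ≤ x % y := Int.emod_nonneg x (by omega)
        have hm1 : x % y < y := Int.emod_lt_of_pos x (by omega)
        rw [hmodeq, ih y (x % y) hy hm0 (by omega)
          (by rw [if_neg (by omega : ¬ x % y > y)]; omega),
          Int.gcd_comm y (x % y), Int.gcd_emod]

-- B's egcd loop: invariants r0 > 0, r1 ≥ 0, x ∣ t*y - r for both pairs; result
-- (g, t) satisfies g > 0, Int.gcd r0 r1 = g.natAbs, x ∣ t*y - g.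
theorem egcdB_spec (x y : Int) : ∀ (n : Nat) (r0 r1 t0 t1 : Int), r1.natAbs ≤ n →
    0 < r0 → 0 ≤ r1 →
    x ∣ t0 * y - r0 → x ∣ t1 * y - r1 →
    0 < (egcdB r0 r1 t0 t1).1 ∧
    Int.gcd r0 r1 = (egcdB r0 r1 t0 t1).1.natAbs ∧
    x ∣ (egcdB r0 r1 t0 t1).2 * y - (egcdB r0 r1 t0 t1).1 := by
  intro n
  induction n with
  | zero =>
    intro r0 r1 t0 t1 hn h0 h1 hd0 hd1
    have hz : r1 = 0 := by omega
    rw [egcdB, dif_pos hz]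
    subst hz
    refine ⟨h0, ?_, hd0⟩
    simp [Int.gcd]
  | succ n ih =>
    intro r0 r1 t0 t1 hn h0 h1 hd0 hd1
    rw [egcdB]
    by_cases hz : r1 = 0
    · rw [dif_pos hz]
      subst hz
      refine ⟨h0, ?_, hd0⟩
      simp [Int.gcd]
    · rw [dif_neg hz]
      have hpos : 0 < r1 := by omega
      have hq : PySem.Int.floordiv r0 r1 = r0 / r1 := PySem.Int.floordiv_eq_ediv_of_pos hpos
      have hm : r0 - PySem.Int.floordiv r0 r1 * r1 = r0 % r1 := by
        rw [hq, Int.emod_def]; ring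
      have hm0 : 0 ≤ r0 % r1 := Int.emod_nonneg r0 (by omega)
      have hm1 : r0 % r1 < r1 := Int.emod_lt_of_pos r0 hpos
      have hdiv : x ∣ (t0 - PySem.Int.floordiv r0 r1 * t1) * y - (r0 - PySem.Int.floordiv r0 r1 * r1) := by
        have : (t0 - PySem.Int.floordiv r0 r1 * t1) * y - (r0 - PySem.Int.floordiv r0 r1 * r1)
            = (t0 * y - r0) - PySem.Int.floordiv r0 r1 * (t1 * y - r1) := by ring
        rw [this]
        exact dvd_sub hd0 (Dvd.dvd.mul_left hd1 _)
      have := ih r1 (r0 - PySem.Int.floordiv r0 r1 * r1) t1 (t0 - PySem.Int.floordiv r0 r1 * t1)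
        (by rw [hm]; omega) hpos (by rw [hm]; omega) hd1 hdiv
      refine ⟨this.1, ?_, this.2.2⟩
      rw [← this.2.1, hm, Int.gcd_comm r1 (r0 % r1), Int.gcd_emod, Int.gcd_comm]

-- A's while loop returns the FIRST b ≥ b0 with x ∣ b*y - value, provided one lies within fuel.
theorem findLoopA_spec (x y value : Int) (hx : 0 < x) : ∀ (fuel : Nat) (b : Int),
    (∃ j : Nat, j < fuel ∧ x ∣ ((b + j) * y - value)) →
    (findLoopA x y value fuel b (b * y)).2 = (findLoopA x y value fuel b (b * y)).1 * y ∧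
    b ≤ (findLoopA x y value fuel b (b * y)).1 ∧
    x ∣ ((findLoopA x y value fuel b (b * y)).1 * y - value) ∧
    ∀ k, b ≤ k → k < (findLoopA x y value fuel b (b * y)).1 → ¬ x ∣ (k * y - value) := by
  intro fuel
  induction fuel with
  | zero => intro b ⟨j, hj, _⟩; omega
  | succ fuel ih =>
    intro b ⟨j, hj, hdvd⟩
    rw [findLoopA]
    have hmodeq : PySem.Int.mod (b * y - value) x = (b * y - value) % x :=
      PySem.Int.mod_eq_emod_of_pos hx
    by_cases hc : PySem.Int.mod (b * y - value) x ≠ 0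
    · rw [if_pos hc]
      have hnb : ¬ x ∣ (b * y - value) := by
        rw [hmodeq] at hc
        intro hd; exact hc (Int.emod_eq_zero_of_dvd hd)
      have hj0 : j ≠ 0 := by
        intro h0; subst h0; simp at hdvd; exact hnb hdvd
      have hb1 : b * y + y = (b + 1) * y := by ring
      rw [hb1]
      have := ih (b + 1) ⟨j - 1, by omega, by
        have : b + 1 + (↑(j - 1) : Int) = b + j := by omega
        rw [this]; exact hdvd⟩
      refine ⟨this.1, by omega, this.2.2.1, ?_⟩
      intro k hk hk2
      by_cases hkb : k = b
      · subst hkb; exact hnb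
      · exact this.2.2.2 k (by omega) hk2
    · rw [if_neg hc]
      have hc' : (b * y - value) % x = 0 := by rw [← hmodeq]; omega
      exact ⟨rfl, le_refl b, Int.dvd_of_emod_eq_zero hc', by omega⟩

-- ===== VERDICT (by name: the statement is the Claim_ definition above) =====
-- main equivalence proof
theorem find_modular_coordinate_eq (x y value : Int)
    (hx : 1 ≤ x) (hy : 0 ≤ y) (hgcd : Int.gcd x y = 1) :
    find_modular_coordinate x y value = find_modular_coordinate_alt x y value := by
  have hxpos : (0:Int) < x := by omega
  -- A's gcd evaluates to 1, so the assert passes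
  have hA : pyGcdA (x.natAbs + y.natAbs + 2) x y = 1 := by
    rw [pyGcdA_eq _ x y (by omega) hy (by omega) (by split <;> omega), hgcd]
    rfl
  -- B's extended Euclid yields the inverse of y modulo x
  have hr1 : PySem.Int.mod y x = y % x := PySem.Int.mod_eq_emod_of_pos hxpos
  have hgx : Int.gcd x (y % x) = 1 := by
    rw [Int.gcd_comm x (y % x), Int.gcd_emod, Int.gcd_comm]; exact hgcd
  have hspec := egcdB_spec x y (y % x).natAbs x (y % x) 0 1 (le_refl _) hxpos
    (Int.emod_nonneg y (by omega))
    (by simp)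
    ⟨y / x, by rw [one_mul, Int.emod_def]; ring⟩
  set g := egcdB x (y % x) 0 1 with hgdef
  have hg1 : g.1 = 1 := by
    have := hspec.2.1
    rw [hgx] at this
    have hpos := hspec.1
    omega
  have hinv : x ∣ g.2 * y - 1 := by rw [← hg1]; exact hspec.2.2
  -- B's candidate b
  have hcval : PySem.Int.mod (value * g.2) x = (value * g.2) % x :=
    PySem.Int.mod_eq_emod_of_pos hxpos
  have hc0 : 0 ≤ PySem.Int.mod (value * g.2) x := hcval ▸ Int.emod_nonneg _ (by omega)
  have hclt : PySem.Int.mod (value * g.2) x < x := hcval ▸ Int.emod_lt_of_pos _ hxpos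
  set bB : Int := if PySem.Int.mod (value * g.2) x = 0 then x
    else PySem.Int.mod (value * g.2) x with hbBdef
  have hbB1 : 1 ≤ bB ∧ bB ≤ x := by rw [hbBdef]; split <;> omega
  have hbBc : x ∣ bB - value * g.2 := by
    have h1 : x ∣ PySem.Int.mod (value * g.2) x - value * g.2 :=
      ⟨-(value * g.2 / x), by rw [hcval, Int.emod_def]; ring⟩
    rw [hbBdef]
    split
    · rename_i h0; rw [h0] at h1; simpa using h1
    · exact h1
  have hbBdvd : x ∣ bB * y - value := by
    have h2 : bB * y - value = (bB - value * g.2) * y + value * (g.2 * y - 1) := by ring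
    rw [h2]
    exact dvd_add (Dvd.dvd.mul_right hbBc y) (Dvd.dvd.mul_left hinv value)
  -- A's loop finds the first valid b; it equals bB
  have hloop := findLoopA_spec x y value hxpos x.toNat 1
    ⟨(bB - 1).toNat, by omega, by
      have hcast : (1 : Int) + ((bB - 1).toNat : Int) = bB := by omega
      rw [hcast]; exact hbBdvd⟩
  rw [one_mul] at hloop
  set bA : Int := (findLoopA x y value x.toNat 1 y).1 with hbAdef
  have hle : bA ≤ bB := by
    by_contra hlt
    exact hloop.2.2.2 bB (by omega) (by omega) hbBdvd
  have hcop : IsCoprime x y := Int.isCoprime_iff_gcd_eq_one.mpr hgcd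
  have hdiff : x ∣ (bA - bB) * y := by
    have h3 : (bA - bB) * y = (bA * y - value) - (bB * y - value) := by ring
    rw [h3]
    exact dvd_sub hloop.2.2.1 hbBdvd
  have hdvdab : x ∣ bA - bB := hcop.dvd_of_dvd_mul_right hdiff
  have hab : bA = bB := by
    have := Int.eq_zero_of_abs_lt_dvd hdvdab (by
      have h1 := hloop.2.1
      rw [abs_lt]
      omega)
    omega
  -- the two 'a' values coincide
  obtain ⟨t, ht⟩ := hbBdvd
  have haA : PySem.Int.floordiv value x - PySem.Int.floordiv (bB * y) x = -t := by
    rw [PySem.Int.floordiv_eq_ediv_of_pos hxpos, PySem.Int.floordiv_eq_ediv_of_pos hxpos]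
    have hv : value = bB * y + -t * x := by
      have e : -t * x = -(x * t) := by ring
      linarith [ht, e]
    rw [hv, Int.add_mul_ediv_right _ _ (by omega : x ≠ 0)]
    ring
  have haB : PySem.Int.floordiv (value - bB * y) x = -t := by
    have hv : value - bB * y = x * -t := by
      have e : x * -t = -(x * t) := by ring
      linarith [ht, e]
    rw [PySem.Int.floordiv_eq_ediv_of_pos hxpos, hv,
      Int.mul_ediv_cancel_left _ (by omega : x ≠ 0)]
  -- assemble both sides
  rw [find_modular_coordinate, find_modular_coordinate_alt, if_neg (by rw [hA]; omega)]
  simp only [hr1, ← hgdef, hg1, ne_eq, not_true_eq_false, if_false, ← hbBdef, ← hbAdef,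
    hloop.1, hab, haA, haB]

theorem find_modular_coordinate_spec : Claim_equal_find_modular_coordinate := by
  intro x y value _ hpre
  unfold Spec_find_modular_coordinate
  exact find_modular_coordinate_eq x y value hpre.1 hpre.2.1 hpre.2.2
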